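-- pv_equiv track=rewrite | github.com/ormai/notes | Fondamenti di programmazione 1/domjudge/LAB2.py | thueMorse
-- ===== SOURCE A (Python) =====
-- def thueMorse(seq):
--     SN = "0"
--     while len(seq) > len(SN):
--         curr = ""
--         for i in SN:
--             if i == "0":
--                 curr += "1"
--             elif i == "1":
--                 curr += "0"
--             else:
--                 return False
--         SN += curr
--
--     if SN.startswith(seq): return True
--     return False
-- ===== SOURCE B (Python) =====
-- def thueMorse(seq):
--     for i in range(len(seq)):
--         bit = bin(i).count('1') % 2
--         if seq[i] != ('1' if bit else '0'):
--             return False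
--     return True
-- ===== Notes on version B (the rewrite author's own statement) =====
-- stated objective: faster
-- what changed: B checks each character directly against the closed-form Thue-Morse bit (parity of the popcount of its index) and stops at the first mismatch, instead of materializing the sequence by repeated doubling-with-complement and running a prefix test.
import Mathlib
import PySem

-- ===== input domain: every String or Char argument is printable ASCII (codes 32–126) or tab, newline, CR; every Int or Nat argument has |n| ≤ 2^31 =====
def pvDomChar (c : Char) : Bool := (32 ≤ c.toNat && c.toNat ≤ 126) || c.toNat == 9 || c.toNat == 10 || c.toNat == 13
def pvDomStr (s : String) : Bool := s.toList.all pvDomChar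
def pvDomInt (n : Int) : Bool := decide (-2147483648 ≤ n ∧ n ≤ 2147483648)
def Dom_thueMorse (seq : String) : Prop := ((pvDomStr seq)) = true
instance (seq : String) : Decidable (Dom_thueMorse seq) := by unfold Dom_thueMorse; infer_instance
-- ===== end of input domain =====

-- B replaces A's doubling construction of the Thue-Morse prefix with a per-index
-- closed-form bit check (parity of the popcount of the index); objective: simpler.

-- ===== PORT A =====
-- inner 'for i in SN' loop building curr; none models the 'return False' branch
def flipLoopA : List Char → List Char → Option (List Char)
  | [], curr => some curr
  | c :: rest, curr =>
    if c = '0' then flipLoopA rest (curr ++ ['1'])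
    else if c = '1' then flipLoopA rest (curr ++ ['0'])
    else none

-- the while loop; fuel only makes it total (fuel = len+1 always suffices for A's call)
def buildA (seq : List Char) : Nat → List Char → Option (List Char)
  | 0, SN => some SN
  | fuel+1, SN =>
    if seq.length > SN.length then
      match flipLoopA SN [] with
      | none => none
      | some curr => buildA seq fuel (SN ++ curr)
    else some SN

def thueMorse (seq : String) : Bool :=
  match buildA seq.toList (seq.toList.length + 1) ['0'] with
  | none => false
  | some SN => if seq.toList.isPrefixOf SN then true else false

-- ===== PORT B =====
-- bin(i).count('1'): popcount by binary recursion
def popB (n : Nat) : Nat :=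
  if n = 0 then 0 else popB (n / 2) + n % 2
decreasing_by exact Nat.div_lt_self (Nat.pos_of_ne_zero (by assumption)) (by omega)

def thueMorse_alt (seq : String) : Bool :=
  (List.range seq.toList.length).all
    (fun i => seq.toList.getD i ' ' == (if popB i % 2 = 1 then '1' else '0'))

-- ===== PRECONDITION & SPEC =====
def Spec_thueMorse (seq : String) (out : Bool) : Prop := out = thueMorse_alt seq
instance (seq : String) (out : Bool) : Decidable (Spec_thueMorse seq out) := by unfold Spec_thueMorse; infer_instance

-- ===== CLAIM (what is proved, stated in full; the proofs are below) =====
def Claim_equal_thueMorse : Prop := ∀ (seq : String), Dom_thueMorse seq → Spec_thueMorse seq (thueMorse seq)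

-- ===== LEMMAS AND PROOFS =====

-- the Thue-Morse bit at index i, as a character
def tmChar (i : Nat) : Char := if popB i % 2 = 1 then '1' else '0'

def tmPrefix (n : Nat) : List Char := (List.range n).map tmChar

theorem popB_zero : popB 0 = 0 := by unfold popB; simp

theorem popB_pos (n : Nat) (h : n ≠ 0) : popB n = popB (n / 2) + n % 2 := by
  conv_lhs => unfold popB
  simp [h]

theorem popB_add_pow (k i : Nat) (hi : i < 2 ^ k) : popB (2 ^ k + i) = popB i + 1 := by
  induction k generalizing i with
  | zero =>
    interval_cases i
    simp [popB_pos 1 (by omega), popB_zero]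
  | succ k ih =>
    have h2 : (2 : Nat) ^ (k + 1) = 2 ^ k * 2 := by ring
    have hne : 2 ^ (k + 1) + i ≠ 0 := by positivity
    rw [popB_pos _ hne]
    have hdiv : (2 ^ (k + 1) + i) / 2 = 2 ^ k + i / 2 := by omega
    have hmod : (2 ^ (k + 1) + i) % 2 = i % 2 := by omega
    rw [hdiv, hmod, ih (i / 2) (by omega)]
    by_cases hz : i = 0
    · simp [hz, popB_zero]
    · rw [popB_pos i hz]; omega

theorem flipLoopA_spec (l acc : List Char) (h : ∀ c ∈ l, c = '0' ∨ c = '1') :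
    flipLoopA l acc = some (acc ++ l.map (fun c => if c = '0' then '1' else '0')) := by
  induction l generalizing acc with
  | nil => simp [flipLoopA]
  | cons c rest ih =>
    rcases h c (by simp) with hc | hc <;>
      simp [flipLoopA, hc, ih _ (fun d hd => h d (by simp [hd]))]

theorem tmChar_cases (i : Nat) : tmChar i = '0' ∨ tmChar i = '1' := by
  unfold tmChar; split <;> simp

theorem tmChar_flip (k i : Nat) (hi : i < 2 ^ k) :
    tmChar (2 ^ k + i) = (fun c => if c = '0' then '1' else '0') (tmChar i) := by
  unfold tmChar
  rw [popB_add_pow k i hi]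
  rcases Nat.even_or_odd (popB i) with h | h
  · have h1 : popB i % 2 = 0 := Nat.even_iff.mp h
    have h2 : (popB i + 1) % 2 = 1 := by omega
    simp [h1, h2]
  · have h1 : popB i % 2 = 1 := Nat.odd_iff.mp h
    have h2 : (popB i + 1) % 2 = 0 := by omega
    simp [h1, h2]

theorem tmPrefix_double (k : Nat) :
    tmPrefix (2 ^ (k + 1)) =
      tmPrefix (2 ^ k) ++ (tmPrefix (2 ^ k)).map (fun c => if c = '0' then '1' else '0') := by
  unfold tmPrefix
  have h : (2 : Nat) ^ (k + 1) = 2 ^ k + 2 ^ k := by ring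
  rw [h, List.range_add, List.map_append, List.map_map, List.map_map]
  congr 1
  apply List.map_congr_left
  intro i hi
  simp only [List.mem_range] at hi
  simpa using tmChar_flip k i hi

theorem tmPrefix_length (n : Nat) : (tmPrefix n).length = n := by simp [tmPrefix]

theorem buildA_spec (seq : List Char) (fuel k : Nat)
    (h : seq.length ≤ 2 ^ k + fuel) :
    ∃ m, buildA seq fuel (tmPrefix (2 ^ k)) = some (tmPrefix (2 ^ m)) ∧ seq.length ≤ 2 ^ m := by
  induction fuel generalizing k with
  | zero => exact ⟨k, by simp [buildA], by omega⟩
  | succ fuel ih =>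
    by_cases hlt : seq.length > (tmPrefix (2 ^ k)).length
    · rw [tmPrefix_length] at hlt
      have hflip := flipLoopA_spec (tmPrefix (2 ^ k)) []
        (by intro c hc; unfold tmPrefix at hc; simp at hc; obtain ⟨i, _, hi⟩ := hc
            rw [← hi]; exact tmChar_cases i)
      have hrec := ih (k + 1) (by have : (1:Nat) ≤ 2 ^ k := Nat.one_le_two_pow; omega)
      obtain ⟨m, hm, hlen⟩ := hrec
      refine ⟨m, ?_, hlen⟩
      simp only [buildA, tmPrefix_length, hlt, if_pos, hflip, List.nil_append]
      rw [← tmPrefix_double k]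
      exact hm
    · rw [tmPrefix_length] at hlt
      exact ⟨k, by simp [buildA, tmPrefix_length, Nat.not_lt.mp (by simpa using hlt)],
             by omega⟩

theorem alt_eq_tmPrefix (l : List Char) :
    ((List.range l.length).all
      (fun i => l.getD i ' ' == (if popB i % 2 = 1 then '1' else '0'))) = true ↔
    l = tmPrefix l.length := by
  rw [List.all_eq_true]
  constructor
  · intro h
    apply List.ext_getElem (by simp [tmPrefix_length])
    intro i hi _
    have := h i (List.mem_range.mpr hi)
    simp only [beq_iff_eq, List.getD_eq_getElem?_getD, List.getElem?_eq_getElem hi,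
      Option.getD_some] at this
    simpa [tmPrefix, tmChar] using this
  · intro h i hi
    simp only [List.mem_range] at hi
    simp only [beq_iff_eq, List.getD_eq_getElem?_getD]
    rw [h]
    simp [tmPrefix, tmChar, hi]

theorem prefix_iff_eq (l : List Char) (m : Nat) (hm : l.length ≤ 2 ^ m) :
    l.isPrefixOf (tmPrefix (2 ^ m)) = true ↔ l = tmPrefix l.length := by
  rw [List.isPrefixOf_iff_prefix, List.prefix_iff_eq_take]
  unfold tmPrefix
  rw [← List.map_take, List.take_range, Nat.min_eq_left hm]

-- ===== VERDICT (by name: the statement is the Claim_ definition above) =====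
theorem thueMorse_spec : Claim_equal_thueMorse := by
  intro seq _
  unfold Spec_thueMorse thueMorse thueMorse_alt
  have h0 : (['0'] : List Char) = tmPrefix (2 ^ 0) := by
    simp [tmPrefix, tmChar, popB_zero]
  obtain ⟨m, hm, hlen⟩ := buildA_spec seq.toList (seq.toList.length + 1) 0 (by omega)
  rw [h0, hm]
  rw [Bool.eq_iff_iff, alt_eq_tmPrefix, ← prefix_iff_eq seq.toList m hlen]
  cases hc : seq.toList.isPrefixOf (tmPrefix (2 ^ m)) <;> simp [hc]
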